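-- pv_equiv track=rewrite | github.com/dkawa2523/cantera_network | benchmarks/scripts/netbench_generate_obs_cantera.py | match_equation
-- ===== SOURCE A (Python) =====
-- def match_equation(target: str, eqs: list[str]) -> int | None:
--     # Exact match first
--     if target in eqs:
--         return eqs.index(target)
--     # Fuzzy: remove spaces
--     t = target.replace(" ", "")
--     for i, e in enumerate(eqs):
--         if e.replace(" ", "") == t:
--             return i
--     # Fuzzy: containment (last resort)
--     for i, e in enumerate(eqs):
--         if t in e.replace(" ", ""):
--             return i
--     return None
-- ===== SOURCE B (Python) =====
-- def match_equation(target: str, eqs: list[str]) -> int | None: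
--     # One pass: rank each equation (1 exact, 2 space-insensitive, 3 containment),
--     # keep the earliest index of the best (smallest) rank seen.
--     t = target.replace(" ", "")
--     best = None  # (rank, index)
--     for i, e in enumerate(eqs):
--         if e == target:
--             rank = 1
--         elif e.replace(" ", "") == t:
--             rank = 2
--         elif t in e.replace(" ", ""):
--             rank = 3
--         else:
--             continue
--         if best is None or rank < best[0]:
--             best = (rank, i)
--     return None if best is None else best[1]
-- ===== Notes on version B (the rewrite author's own statement) =====
-- stated objective: alternative
-- what changed: Replaced A's three sequential full scans (membership+index, then two enumerate loops) with a single pass that assigns each equation a match rank (1 exact, 2 space-stripped equality, 3 containment) and keeps the earliest index of the strictly best rank.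
import Mathlib
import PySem

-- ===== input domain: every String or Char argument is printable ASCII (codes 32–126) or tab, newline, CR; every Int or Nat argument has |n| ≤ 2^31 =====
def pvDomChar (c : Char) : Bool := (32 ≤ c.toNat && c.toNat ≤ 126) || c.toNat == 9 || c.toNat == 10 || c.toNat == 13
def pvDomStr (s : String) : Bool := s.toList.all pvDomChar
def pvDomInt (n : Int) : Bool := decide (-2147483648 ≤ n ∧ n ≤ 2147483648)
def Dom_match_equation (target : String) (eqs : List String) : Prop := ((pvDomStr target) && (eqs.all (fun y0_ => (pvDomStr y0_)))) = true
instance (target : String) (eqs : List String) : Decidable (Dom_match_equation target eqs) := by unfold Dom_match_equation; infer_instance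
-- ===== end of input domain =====

-- B replaces A's three sequential scans with one ranked pass keeping the earliest best rank; same return value ('alternative', no speed claim).

-- ===== PORT A =====
def match_equation (target : String) (eqs : List String) : Option Int :=
  -- Exact match first
  if eqs.contains target then
    (PySem.List.index? eqs target).map (fun k => (k : Int))
  else
    -- Fuzzy: remove spaces
    let t := PySem.Str.replace target " " ""
    match (PySem.List.enumerate eqs).find? (fun p => PySem.Str.replace p.2 " " "" == t) with
    | some p => some p.1
    | none =>
      -- Fuzzy: containment (last resort)
      match (PySem.List.enumerate eqs).find? (fun p => PySem.Str.isIn t (PySem.Str.replace p.2 " " "")) with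
      | some p => some p.1
      | none => none

-- ===== PORT B =====
def rankOf (target t e : String) : Option Nat :=
  if e == target then some 1
  else if PySem.Str.replace e " " "" == t then some 2
  else if PySem.Str.isIn t (PySem.Str.replace e " " "") then some 3
  else none

def stepB (target t : String) (best : Option (Nat × Int)) (p : Int × String) : Option (Nat × Int) :=
  match rankOf target t p.2 with
  | none => best
  | some r =>
    match best with
    | none => some (r, p.1)
    | some (br, bi) => if r < br then some (r, p.1) else some (br, bi)

def match_equation_alt (target : String) (eqs : List String) : Option Int :=
  let t := PySem.Str.replace target " " ""
  ((PySem.List.enumerate eqs).foldl (stepB target t) none).map (·.2)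

-- ===== PRECONDITION & SPEC =====
def Spec_match_equation (target : String) (eqs : List String) (out : Option Int) : Prop := out = match_equation_alt target eqs
instance (target : String) (eqs : List String) (out : Option Int) : Decidable (Spec_match_equation target eqs out) := by unfold Spec_match_equation; infer_instance

-- ===== CLAIM (what is proved, stated in full; the proofs are below) =====
def Claim_equal_match_equation : Prop := ∀ (target : String) (eqs : List String), Dom_match_equation target eqs → Spec_match_equation target eqs (match_equation target eqs)

-- ===== LEMMAS AND PROOFS =====

-- left-biased "keep the strictly better rank" combiner underlying B's loop
def pvMerge : Option (Nat × Int) → Option (Nat × Int) → Option (Nat × Int)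
  | none, r => r
  | some b, none => some b
  | some (br, bi), some (rr, ri) => if rr < br then some (rr, ri) else some (br, bi)

-- B's step, with the three match predicates abstracted (so case analysis stays syntactic)
def genStep (q1 q2 q3 : String → Bool) (best : Option (Nat × Int)) (p : Int × String) :
    Option (Nat × Int) :=
  match (if q1 p.2 then some 1 else if q2 p.2 then some 2 else if q3 p.2 then some 3 else none : Option Nat) with
  | none => best
  | some r =>
    match best with
    | none => some (r, p.1)
    | some (br, bi) => if r < br then some (r, p.1) else some (br, bi)

-- closed form of B's loop: first q1 index, else first q2 index, else first q3 index
def genSpec (q1 q2 q3 : String → Bool) (xs : List String) (s : Int) : Option (Nat × Int) :=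
  match xs.findIdx? q1 with
  | some i => some (1, s + i)
  | none =>
    match xs.findIdx? q2 with
    | some i => some (2, s + i)
    | none => (xs.findIdx? q3).map (fun i => (3, s + (i : Int)))

lemma genStep_eq_merge (q1 q2 q3 : String → Bool) (b : Option (Nat × Int)) (p : Int × String) :
    genStep q1 q2 q3 b p = pvMerge b (genStep q1 q2 q3 none p) := by
  unfold genStep
  rcases (if q1 p.2 then some 1 else if q2 p.2 then some 2 else if q3 p.2 then some 3 else none : Option Nat) with _ | r
  · cases b <;> rfl
  · cases b with
    | none => rfl
    | some q => cases q; simp only [pvMerge]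

lemma pvMerge_assoc (a b c : Option (Nat × Int)) :
    pvMerge (pvMerge a b) c = pvMerge a (pvMerge b c) := by
  rcases a with _ | ⟨ar, ai⟩
  · rfl
  rcases b with _ | ⟨br, bi⟩
  · cases c <;> rfl
  rcases c with _ | ⟨cr, ci⟩
  · simp only [pvMerge]; split_ifs <;> rfl
  by_cases hba : br < ar <;> by_cases hcb : cr < br <;> by_cases hca : cr < ar <;>
    simp [pvMerge, hba, hcb, hca] <;> omega

lemma foldl_genStep_state (q1 q2 q3 : String → Bool) (l : List (Int × String))
    (b : Option (Nat × Int)) :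
    l.foldl (genStep q1 q2 q3) b = pvMerge b (l.foldl (genStep q1 q2 q3) none) := by
  induction l generalizing b with
  | nil => cases b <;> rfl
  | cons x l ih =>
    simp only [List.foldl_cons]
    rw [ih (genStep q1 q2 q3 b x), ih (genStep q1 q2 q3 none x),
        genStep_eq_merge, pvMerge_assoc]

lemma foldl_genStep_none (q1 q2 q3 : String → Bool) (xs : List String) (s : Int) :
    (PySem.List.enumerate xs s).foldl (genStep q1 q2 q3) none = genSpec q1 q2 q3 xs s := by
  induction xs generalizing s with
  | nil => rfl
  | cons x xs ih =>
    rw [PySem.List.enumerate_cons, List.foldl_cons, foldl_genStep_state, ih]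
    show pvMerge (genStep q1 q2 q3 none (s, x)) (genSpec q1 q2 q3 xs (s + 1)) = _
    unfold genSpec genStep
    rcases hfx : List.findIdx? q1 xs with _ | i <;>
      rcases hf2 : List.findIdx? q2 xs with _ | j <;>
      rcases hf3 : List.findIdx? q3 xs with _ | k <;>
      by_cases h1 : q1 x <;> by_cases h2 : q2 x <;> by_cases h3 : q3 x <;>
      simp [List.findIdx?_cons, pvMerge, hfx, hf2, hf3, h1, h2, h3] <;> omega

lemma find?_enumerate_map_fst (q : String → Bool) (xs : List String) (s : Int) :
    ((PySem.List.enumerate xs s).find? (fun p => q p.2)).map (·.1)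
      = (xs.findIdx? q).map (fun i => s + (i : Int)) := by
  induction xs generalizing s with
  | nil => rfl
  | cons x xs ih =>
    rw [PySem.List.enumerate_cons, List.findIdx?_cons]
    by_cases hq : q x
    · simp [hq]
    · simp only [List.find?_cons, hq, Bool.false_eq_true, if_false, ih (s + 1)]
      cases xs.findIdx? q <;> simp <;> omega

lemma find?_enumerate_eq_none (q : String → Bool) (xs : List String) (s : Int)
    (h : xs.findIdx? q = none) :
    (PySem.List.enumerate xs s).find? (fun p => q p.2) = none := by
  have h2 := find?_enumerate_map_fst q xs s
  rw [h] at h2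
  simpa using h2

lemma find?_enumerate_eq_some (q : String → Bool) (xs : List String) (s : Int) (i : Nat)
    (h : xs.findIdx? q = some i) :
    ∃ e, (PySem.List.enumerate xs s).find? (fun p => q p.2) = some (s + i, e) := by
  have h2 := find?_enumerate_map_fst q xs s
  rw [h] at h2
  rw [show ((some i : Option Nat).map (fun i => s + (i : Int))) = some (s + i) from rfl] at h2
  rw [Option.map_eq_some_iff] at h2
  obtain ⟨⟨a, b⟩, hp, hp1⟩ := h2
  simp only at hp1
  exact ⟨b, by rw [hp, hp1]⟩

-- ===== VERDICT (by name: the statement is the Claim_ definition above) =====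
theorem match_equation_spec : Claim_equal_match_equation := by
  intro target eqs _
  unfold Spec_match_equation match_equation match_equation_alt
  have hstep : stepB target (PySem.Str.replace target " " "")
      = genStep (· == target)
          (fun e => PySem.Str.replace e " " "" == PySem.Str.replace target " " "")
          (fun e => PySem.Str.isIn (PySem.Str.replace target " " "") (PySem.Str.replace e " " "")) := rfl
  simp only [hstep, foldl_genStep_none]
  by_cases hc : eqs.contains target
  · simp only [hc, if_true]
    have hmem : target ∈ eqs := by simpa using hc
    have hidx : List.idxOf? target eqs = List.findIdx? (· == target) eqs := by
      simp [List.idxOf?]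
    rcases hfx : List.findIdx? (· == target) eqs with _ | i
    · exfalso
      rw [List.findIdx?_eq_none_iff] at hfx
      simpa using hfx target hmem
    · simp [hidx, hfx, genSpec]
  · simp only [hc, Bool.false_eq_true, if_false]
    have hfx : List.findIdx? (· == target) eqs = none := by
      rw [List.findIdx?_eq_none_iff]
      intro x hx
      simp only [beq_eq_false_iff_ne]
      rintro rfl
      exact hc (by simpa using List.contains_iff_exists_mem_beq.mpr ⟨x, hx, by simp⟩)
    rcases hf2 : List.findIdx? (fun e => PySem.Str.replace e " " "" == PySem.Str.replace target " " "") eqs with _ | j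
    · have hfind2 := find?_enumerate_eq_none
        (fun e => PySem.Str.replace e " " "" == PySem.Str.replace target " " "") eqs 0 hf2
      rcases hf3 : List.findIdx? (fun e => PySem.Str.isIn (PySem.Str.replace target " " "") (PySem.Str.replace e " " "")) eqs with _ | k
      · have hfind3 := find?_enumerate_eq_none
          (fun e => PySem.Str.isIn (PySem.Str.replace target " " "") (PySem.Str.replace e " " "")) eqs 0 hf3
        simp only [hfind2, hfind3]
        simp only [genSpec, hfx, hf2, hf3]
        rfl
      · obtain ⟨e, hfind3⟩ := find?_enumerate_eq_some
          (fun e => PySem.Str.isIn (PySem.Str.replace target " " "") (PySem.Str.replace e " " "")) eqs 0 k hf3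
        simp only [hfind2, hfind3]
        simp only [genSpec, hfx, hf2, hf3]
        simp
    · obtain ⟨e, hfind2⟩ := find?_enumerate_eq_some
        (fun e => PySem.Str.replace e " " "" == PySem.Str.replace target " " "") eqs 0 j hf2
      simp only [hfind2]
      simp only [genSpec, hfx, hf2]
      simp
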